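-- pv_equiv track=rewrite | github.com/AHMAD-DOMA/Mustashhed | main.py | remove_near_distances
-- ===== SOURCE A (Python) =====
-- def remove_near_distances(distances, indices, threshold):
--     new_distances = []
--     new_indices = []
--
--     for i in range(len(distances)):
--         current_distance = distances[i]
--         should_add = True
--
--         # Check if the current distance is near any existing distance
--         for j in range(len(new_distances)):
--             existing_distance = new_distances[j]
--
--             if abs(current_distance - existing_distance) < threshold:
--                 should_add = False
--                 break
--
--         if should_add:
--             new_distances.append(current_distance)
--             new_indices.append(indices[i])
--
--     return new_distances, new_indices
-- ===== SOURCE B (Python) =====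
-- def remove_near_distances(distances, indices, threshold):
--     if threshold == 0:
--         return list(distances), list(indices[:len(distances)])
--     # any two values in the same width-|threshold| bucket are within threshold of each
--     # other, so at most one kept distance ever lives in a bucket: map bucket -> value.
--     buckets = {}
--     get = buckets.get
--     new_distances = []
--     new_indices = []
--     for d, idx in zip(distances, indices):
--         k = d // threshold
--         e = get(k)
--         if e is not None and abs(d - e) < threshold:
--             continue
--         e = get(k - 1)
--         if e is not None and abs(d - e) < threshold:
--             continue
--         e = get(k + 1)
--         if e is not None and abs(d - e) < threshold:
--             continue
--         buckets[k] = d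
--         new_distances.append(d)
--         new_indices.append(idx)
--     return new_distances, new_indices
-- ===== Notes on version B (the rewrite author's own statement) =====
-- stated objective: faster
-- what changed: B replaces A's inner linear scan of all kept distances by a dict bucketing kept distances by floor(d/threshold), checking only the query's own and two adjacent buckets (and iterates pairs via zip instead of indexing).
-- outside the precondition, e.g. on remove_near_distances([0, 0], [5], 1): A returns ([0], [5]), B returns ([0], [5])
import Mathlib
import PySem

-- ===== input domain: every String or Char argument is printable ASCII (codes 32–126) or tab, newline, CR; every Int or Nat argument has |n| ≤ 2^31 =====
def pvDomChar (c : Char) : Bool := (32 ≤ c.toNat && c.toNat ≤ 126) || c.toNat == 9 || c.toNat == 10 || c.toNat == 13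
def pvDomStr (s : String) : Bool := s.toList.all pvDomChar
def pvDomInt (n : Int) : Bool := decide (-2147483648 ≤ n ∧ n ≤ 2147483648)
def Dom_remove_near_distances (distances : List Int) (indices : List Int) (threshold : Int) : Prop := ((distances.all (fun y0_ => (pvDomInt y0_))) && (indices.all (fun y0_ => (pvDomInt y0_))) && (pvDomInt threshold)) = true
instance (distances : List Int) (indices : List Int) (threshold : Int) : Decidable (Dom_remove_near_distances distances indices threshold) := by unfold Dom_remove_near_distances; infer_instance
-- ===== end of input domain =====

-- B buckets kept distances by floor(d/threshold) in a dict and checks only the three adjacent buckets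
-- per query instead of A's linear scan over all kept distances (measured faster, asymptotic mechanism).


-- ===== PORT A =====
-- inner 'for j in range(len(new_distances))' loop with the break: returns should_add
def aShouldAdd (new_distances : List Int) (current : Int) (threshold : Int) : Bool :=
  match new_distances with
  | [] => true
  | e :: rest => if |current - e| < threshold then false else aShouldAdd rest current threshold

def remove_near_distances (distances : List Int) (indices : List Int) (threshold : Int) : List Int × List Int :=
  (PySem.List.pyRange 0 (distances.length : Int) 1).foldl
    (fun (st : List Int × List Int) i =>
      let c := PySem.List.pyGetD distances i 0
      if aShouldAdd st.1 c threshold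
      then (st.1 ++ [c], st.2 ++ [PySem.List.pyGetD indices i 0])
      else st)
    ([], [])

-- ===== PORT B =====
-- "e = buckets.get(kk); if e is not None and abs(d - e) < threshold": one bucket probe
def bNearOne (buckets : PySem.Dict Int Int) (kk d t : Int) : Bool :=
  match PySem.Dict.get? buckets kk with
  | some e => |d - e| < t
  | none => false

-- one iteration of B's 'for d, idx in zip(distances, indices)' loop (probes buckets k, k-1, k+1)
def bStep (t : Int) (st : PySem.Dict Int Int × List Int × List Int) (p : Int × Int) :
    PySem.Dict Int Int × List Int × List Int :=
  let k := PySem.Int.floordiv p.1 t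
  if bNearOne st.1 k p.1 t || bNearOne st.1 (k - 1) p.1 t || bNearOne st.1 (k + 1) p.1 t then st
  else (PySem.Dict.insert st.1 k p.1, st.2.1 ++ [p.1], st.2.2 ++ [p.2])

def remove_near_distances_alt (distances : List Int) (indices : List Int) (threshold : Int) : List Int × List Int :=
  if threshold = 0 then
    (distances, PySem.List.slice indices none (some (distances.length : Int)))
  else
    let st := (distances.zip indices).foldl (bStep threshold) (PySem.Dict.empty, [], [])
    (st.2.1, st.2.2)

-- ===== PRECONDITION & SPEC =====
-- Pre_ requires len(indices) ≥ len(distances): with a shorter indices list A raises IndexError as soon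
-- as a position past its end is kept; A can still return on such inputs when every such position is
-- rejected as near (and then B agrees), so Pre_ is slightly narrower than A's raising set.
def Pre_remove_near_distances (distances : List Int) (indices : List Int) (threshold : Int) : Prop :=
  distances.length ≤ indices.length
instance (distances : List Int) (indices : List Int) (threshold : Int) : Decidable (Pre_remove_near_distances distances indices threshold) := by unfold Pre_remove_near_distances; infer_instance

def pvWitness_remove_near_distances : List Int × List Int × Int := ([0, 5, 1], [10, 20, 30], 3)

def Spec_remove_near_distances (distances : List Int) (indices : List Int) (threshold : Int) (out : List Int × List Int) : Prop := out = remove_near_distances_alt distances indices threshold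
instance (distances : List Int) (indices : List Int) (threshold : Int) (out : List Int × List Int) : Decidable (Spec_remove_near_distances distances indices threshold out) := by unfold Spec_remove_near_distances; infer_instance

-- ===== CLAIM (what is proved, stated in full; the proofs are below) =====
def Claim_equal_remove_near_distances : Prop := ∀ (distances : List Int) (indices : List Int) (threshold : Int), Dom_remove_near_distances distances indices threshold → Pre_remove_near_distances distances indices threshold → Spec_remove_near_distances distances indices threshold (remove_near_distances distances indices threshold)

-- ===== LEMMAS AND PROOFS =====

-- A's index loop over range(len(distances)) equals a structural fold over the zipped lists.
theorem foldl_range_two_lists {σ : Type} (ds is_ : List Int) (f : σ → Int → Int → σ)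
    (hlen : ds.length ≤ is_.length) :
    ∀ (n k : Nat) (init : σ), ds.length - k = n →
      (PySem.List.pyRange (k : Int) (ds.length : Int) 1).foldl
        (fun st i => f st (PySem.List.pyGetD ds i 0) (PySem.List.pyGetD is_ i 0)) init
      = ((ds.drop k).zip (is_.drop k)).foldl (fun st p => f st p.1 p.2) init := by
  intro n
  induction n with
  | zero =>
    intro k init h
    have hk : ds.length ≤ k := by omega
    rw [PySem.List.pyRange_one_eq_nil (by exact_mod_cast hk)]
    rw [List.drop_eq_nil_of_le hk]
    rfl
  | succ m ih =>
    intro k init h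
    have hk : k < ds.length := by omega
    have hk2 : k < is_.length := by omega
    rw [PySem.List.pyRange_one_cons (by exact_mod_cast hk)]
    have h1 : PySem.List.pyGetD ds (k : Int) 0 = ds[k] := PySem.List.pyGetD_ofNat ds k 0 hk
    have h2 : PySem.List.pyGetD is_ (k : Int) 0 = is_[k] := PySem.List.pyGetD_ofNat is_ k 0 hk2
    have hd : ds.drop k = ds[k] :: ds.drop (k + 1) := List.drop_eq_getElem_cons hk
    have hi : is_.drop k = is_[k] :: is_.drop (k + 1) := List.drop_eq_getElem_cons hk2
    rw [hd, hi]
    simp only [List.foldl_cons, List.zip_cons_cons, h1, h2]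
    have : ((k : Int) + 1) = ((k + 1 : Nat) : Int) := by push_cast; ring
    rw [this, ih (k + 1) _ (by omega)]

-- aShouldAdd is the negated existence test
theorem aShouldAdd_eq (nd : List Int) (c t : Int) :
    aShouldAdd nd c t = !(nd.any (fun e => decide (|c - e| < t))) := by
  induction nd with
  | nil => rfl
  | cons e rest ih =>
    simp only [aShouldAdd, List.any_cons]
    by_cases h : |c - e| < t <;> simp [h, ih]

-- with a nonpositive threshold nothing is ever near
theorem aShouldAdd_of_nonpos (nd : List Int) (c t : Int) (ht : t ≤ 0) :
    aShouldAdd nd c t = true := by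
  rw [aShouldAdd_eq]
  simp only [Bool.not_eq_true', List.any_eq_false]
  intro e _
  simp only [decide_eq_true_eq]
  exact not_lt.mpr (le_trans ht (abs_nonneg _))

-- the bucket of any distance within threshold of c is adjacent to c's bucket
theorem bucket_adjacent (c e t : Int) (ht : 0 < t) (hnear : |c - e| < t) :
    PySem.Int.floordiv e t = PySem.Int.floordiv c t - 1 ∨
    PySem.Int.floordiv e t = PySem.Int.floordiv c t ∨
    PySem.Int.floordiv e t = PySem.Int.floordiv c t + 1 := by
  set q := PySem.Int.floordiv e t with hq
  set k := PySem.Int.floordiv c t with hk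
  have hqb : q * t ≤ e ∧ e < (q + 1) * t :=
    (PySem.Int.floordiv_eq_iff_of_pos ht).mp hq.symm
  have hkb : k * t ≤ c ∧ c < (k + 1) * t :=
    (PySem.Int.floordiv_eq_iff_of_pos ht).mp hk.symm
  have habs := abs_lt.mp hnear
  have h1 : (k - 1) * t < (q + 1) * t := by nlinarith [hqb.1, hqb.2, hkb.1, hkb.2, habs.1, habs.2]
  have h2 : q * t < (k + 2) * t := by nlinarith [hqb.1, hqb.2, hkb.1, hkb.2, habs.1, habs.2]
  have h1' : k - 1 < q + 1 := lt_of_mul_lt_mul_right h1 (le_of_lt ht)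
  have h2' : q < k + 2 := lt_of_mul_lt_mul_right h2 (le_of_lt ht)
  omega

-- two values in the same bucket are within threshold of each other
theorem same_bucket_near (d e t : Int) (ht : 0 < t)
    (h : PySem.Int.floordiv e t = PySem.Int.floordiv d t) : |d - e| < t := by
  have he := (PySem.Int.floordiv_eq_iff_of_pos ht).mp h
  have hd := (PySem.Int.floordiv_eq_iff_of_pos ht).mp (rfl : PySem.Int.floordiv d t = _)
  rw [abs_lt]
  have hexp : (PySem.Int.floordiv d t + 1) * t = PySem.Int.floordiv d t * t + t := by ring
  rw [hexp] at he hd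
  omega

-- the loop invariant tying B's buckets to the kept list (only meaningful for 0 < t:
-- with t < 0 nothing is ever near, so the bucket contents are irrelevant)
def BInv (t : Int) (b : PySem.Dict Int Int) (nd : List Int) : Prop :=
  0 < t →
    (∀ kk e, PySem.Dict.get? b kk = some e → PySem.Int.floordiv e t = kk ∧ e ∈ nd) ∧
    (∀ e ∈ nd, PySem.Dict.get? b (PySem.Int.floordiv e t) = some e)

-- a single probe can only report a genuinely near kept distance
theorem bNearOne_false_of_nonpos (b : PySem.Dict Int Int) (kk d t : Int) (ht : t ≤ 0) :
    bNearOne b kk d t = false := by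
  unfold bNearOne
  cases PySem.Dict.get? b kk with
  | none => rfl
  | some e =>
    simp only [decide_eq_false_iff_not, not_lt]
    exact le_trans ht (abs_nonneg _)

-- under the invariant, B's three-bucket probe agrees with A's full scan
theorem bNear_eq (t : Int) (b : PySem.Dict Int Int) (nd : List Int)
    (hinv : BInv t b nd) (c : Int) :
    (bNearOne b (PySem.Int.floordiv c t) c t
      || bNearOne b (PySem.Int.floordiv c t - 1) c t
      || bNearOne b (PySem.Int.floordiv c t + 1) c t)
    = nd.any (fun e => decide (|c - e| < t)) := by
  rcases le_or_gt t 0 with hle | hpos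
  · rw [bNearOne_false_of_nonpos _ _ _ _ hle, bNearOne_false_of_nonpos _ _ _ _ hle,
      bNearOne_false_of_nonpos _ _ _ _ hle]
    symm
    simp only [Bool.or_false, List.any_eq_false]
    intro e _
    simp only [decide_eq_true_eq]
    exact not_lt.mpr (le_trans hle (abs_nonneg _))
  · obtain ⟨h1, h2⟩ := hinv hpos
    apply Bool.eq_iff_iff.mpr
    simp only [Bool.or_eq_true, List.any_eq_true, decide_eq_true_eq]
    have probe : ∀ kk, bNearOne b kk c t = true ↔
        ∃ e, PySem.Dict.get? b kk = some e ∧ |c - e| < t := by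
      intro kk
      unfold bNearOne
      cases PySem.Dict.get? b kk with
      | none => simp
      | some e => simp
    simp only [probe]
    constructor
    · rintro ((⟨e, he, hnear⟩ | ⟨e, he, hnear⟩) | ⟨e, he, hnear⟩) <;>
        exact ⟨e, (h1 _ e he).2, hnear⟩
    · rintro ⟨e, he, hnear⟩
      have hmem := h2 e he
      rcases bucket_adjacent c e t hpos hnear with hadj | hadj | hadj
      · left; right; exact ⟨e, by rw [← hadj]; exact hmem, hnear⟩
      · left; left; exact ⟨e, by rw [← hadj]; exact hmem, hnear⟩
      · right; exact ⟨e, by rw [← hadj]; exact hmem, hnear⟩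

-- adding a kept distance (whose own bucket probe came back false) preserves the invariant
theorem BInv_add (t : Int) (b : PySem.Dict Int Int) (nd : List Int) (d : Int)
    (hinv : BInv t b nd) (hself : bNearOne b (PySem.Int.floordiv d t) d t = false) :
    BInv t (PySem.Dict.insert b (PySem.Int.floordiv d t) d) (nd ++ [d]) := by
  intro ht
  obtain ⟨h1, h2⟩ := hinv ht
  set k := PySem.Int.floordiv d t with hk
  -- the target bucket must be empty: an occupant would be near d
  have hempty : PySem.Dict.get? b k = none := by
    cases hc : PySem.Dict.get? b k with
    | none => rfl
    | some e =>
      have hnear := same_bucket_near d e t ht (h1 k e hc).1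
      unfold bNearOne at hself
      rw [hc] at hself
      simp only [decide_eq_false_iff_not] at hself
      exact absurd hnear hself
  constructor
  · intro kk e he
    rw [PySem.Dict.get?_insert] at he
    by_cases hkk : kk = k
    · rw [if_pos hkk] at he
      obtain rfl : d = e := by injection he
      exact ⟨by rw [hkk, hk], by simp⟩
    · rw [if_neg hkk] at he
      exact ⟨(h1 kk e he).1, by simp [(h1 kk e he).2]⟩
  · intro e he
    rw [List.mem_append, List.mem_singleton] at he
    rw [PySem.Dict.get?_insert]
    rcases he with he | he
    · have hne : PySem.Int.floordiv e t ≠ k := by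
        intro hfe
        have hcontra := h2 e he
        rw [hfe, hempty] at hcontra
        simp at hcontra
      rw [if_neg hne]
      exact h2 e he
    · subst he
      rw [if_pos rfl]

-- main induction: B's bucketed loop computes the same kept lists as A's scan loop
theorem bLoop_eq (t : Int) :
    ∀ (pairs : List (Int × Int)) (b : PySem.Dict Int Int) (nd ni : List Int),
      BInv t b nd →
      (pairs.foldl (bStep t) (b, nd, ni)).2
      = pairs.foldl
          (fun (st : List Int × List Int) p =>
            if aShouldAdd st.1 p.1 t then (st.1 ++ [p.1], st.2 ++ [p.2]) else st)
          (nd, ni) := by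
  intro pairs
  induction pairs with
  | nil => intro b nd ni _; rfl
  | cons p rest ih =>
    intro b nd ni hinv
    simp only [List.foldl_cons]
    have hbn := bNear_eq t b nd hinv p.1
    rw [aShouldAdd_eq]
    by_cases hnear : (bNearOne b (PySem.Int.floordiv p.1 t) p.1 t
        || bNearOne b (PySem.Int.floordiv p.1 t - 1) p.1 t
        || bNearOne b (PySem.Int.floordiv p.1 t + 1) p.1 t) = true
    · have hany : nd.any (fun e => decide (|p.1 - e| < t)) = true := by rw [← hbn]; exact hnear
      simp only [bStep, hnear, if_pos, hany, Bool.not_true, Bool.false_eq_true, if_false]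
      exact ih b nd ni hinv
    · have hfalse : (bNearOne b (PySem.Int.floordiv p.1 t) p.1 t
          || bNearOne b (PySem.Int.floordiv p.1 t - 1) p.1 t
          || bNearOne b (PySem.Int.floordiv p.1 t + 1) p.1 t) = false := by
        simpa using hnear
      have hany : nd.any (fun e => decide (|p.1 - e| < t)) = false := by rw [← hbn]; exact hfalse
      have hself : bNearOne b (PySem.Int.floordiv p.1 t) p.1 t = false := by
        rcases Bool.or_eq_false_iff.mp hfalse with ⟨hf, _⟩
        exact (Bool.or_eq_false_iff.mp hf).1
      simp only [bStep, hfalse, Bool.false_eq_true, if_false, hany, Bool.not_false, if_true]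
      exact ih _ _ _ (BInv_add t b nd p.1 hinv hself)

-- map snd of a zip when the first list is the shorter one
theorem map_snd_zip_of_le (ds is_ : List Int) (h : ds.length ≤ is_.length) :
    (ds.zip is_).map Prod.snd = is_.take ds.length := by
  induction ds generalizing is_ with
  | nil => simp
  | cons d ds ih =>
    cases is_ with
    | nil => simp at h
    | cons i is_ =>
      simp only [List.zip_cons_cons, List.map_cons, List.length_cons, List.take_succ_cons]
      rw [ih is_ (by simpa using h)]

-- the invariant holds for the empty dict
theorem BInv_empty (t : Int) : BInv t PySem.Dict.empty [] := by
  intro _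
  constructor
  · intro kk e he
    simp [PySem.Dict.get?, PySem.Dict.empty] at he
  · intro e he; simp at he

-- ===== VERDICT (by name: the statement is the Claim_ definition above) =====
theorem remove_near_distances_spec : Claim_equal_remove_near_distances := by
  intro distances indices threshold _ hpre
  unfold Spec_remove_near_distances remove_near_distances remove_near_distances_alt
  have hA := foldl_range_two_lists (σ := List Int × List Int) distances indices
      (fun st c idx => if aShouldAdd st.1 c threshold then (st.1 ++ [c], st.2 ++ [idx]) else st)
      hpre (distances.length) 0 ([], []) (by omega)
  simp only [Nat.cast_zero, List.drop_zero] at hA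
  rw [hA]
  by_cases ht : threshold = 0
  · subst ht
    rw [if_pos rfl]
    have hall : ∀ (st : List Int × List Int) (p : Int × Int), p ∈ distances.zip indices →
        (if aShouldAdd st.1 p.1 0 then (st.1 ++ [p.1], st.2 ++ [p.2]) else st)
        = (st.1 ++ [p.1], st.2 ++ [p.2]) := by
      intro st p _
      rw [aShouldAdd_of_nonpos st.1 p.1 0 le_rfl, if_pos rfl]
    rw [PySem.List.foldl_congr_mem _ _ (fun st (p : Int × Int) => (st.1 ++ [p.1], st.2 ++ [p.2])) _ hall]
    rw [PySem.List.foldl_prod_mk (f := fun a (p : Int × Int) => a ++ [p.1])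
        (g := fun a (p : Int × Int) => a ++ [p.2])]
    rw [PySem.List.foldl_append_singleton_eq_map, PySem.List.foldl_append_singleton_eq_map]
    rw [PySem.List.slice_to_natCast]
    have h1 : (distances.zip indices).map Prod.fst = distances := List.map_fst_zip hpre
    have h2 : (distances.zip indices).map Prod.snd = indices.take distances.length :=
      map_snd_zip_of_le distances indices hpre
    simp [h1, h2]
  · rw [if_neg ht]
    exact (bLoop_eq threshold (distances.zip indices) PySem.Dict.empty [] []
      (BInv_empty threshold)).symm
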